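-- pv_equiv track=rewrite | github.com/ebehlmann/advent_of_python | 2017/day_3.py | create_coordinates
-- ===== SOURCE A (Python) =====
-- def create_coordinates(end_point):
--
-- 	coordinates = {}
-- 	coordinates[1] = [0, 0]
--
-- 	i = 2
-- 	x = 0
-- 	y = 0
-- 	direction_to_move = 'right'
-- 	amount_to_move = 1
-- 	amount_moved = 0
--
-- 	while(i <= end_point):
-- 		if(direction_to_move == 'right'):
-- 			x += 1
-- 			amount_moved += 1
-- 			if(amount_to_move == amount_moved):
-- 				direction_to_move = 'up'
-- 				amount_moved = 0
-- 		elif(direction_to_move == 'up'):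
-- 			y += 1
-- 			amount_moved += 1
-- 			if(amount_to_move == amount_moved):
-- 				direction_to_move = 'left'
-- 				amount_moved = 0
-- 				amount_to_move += 1
-- 		elif(direction_to_move == 'left'):
-- 			x -= 1
-- 			amount_moved += 1
-- 			if(amount_to_move == amount_moved):
-- 				direction_to_move = 'down'
-- 				amount_moved = 0
-- 		elif(direction_to_move == 'down'):
-- 			y -= 1
-- 			amount_moved += 1
-- 			if(amount_to_move == amount_moved):
-- 				direction_to_move = 'right'
-- 				amount_moved = 0
-- 				amount_to_move += 1
--
-- 		coordinates[i] = [x, y]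
-- 		i += 1
--
-- 	return coordinates
-- ===== SOURCE B (Python) =====
-- def _side_coord(k, m):
--     # coordinate of offset m (0-based) along ring k of the spiral, read
--     # directly off the ring's four sides
--     if m < 2 * k:
--         return [k, m - k + 1]
--     elif m < 4 * k:
--         return [3 * k - 1 - m, k]
--     elif m < 6 * k:
--         return [-k, 5 * k - 1 - m]
--     else:
--         return [m - 7 * k + 1, -k]
--
--
-- def create_coordinates(end_point):
--     # Closed-form: each n lies on ring k with (2k-1)^2 < n <= (2k+1)^2; its
--     # coordinate is an arithmetic function of its offset along the ring,
--     # so no direction state machine / walking is needed.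
--     coordinates = {1: [0, 0]}
--     n = 2
--     k = 1
--     while n <= end_point:
--         if n > (2 * k + 1) ** 2:
--             k += 1
--         coordinates[n] = _side_coord(k, n - (2 * k - 1) ** 2 - 1)
--         n += 1
--     return coordinates
-- ===== Notes on version B (the rewrite author's own statement) =====
-- stated objective: alternative
-- what changed: A walks the spiral with a per-step direction string state machine and run-length counters; B computes each number's coordinate by a closed-form ring/offset formula ((2k-1)^2 < n <= (2k+1)^2, coordinate read arithmetically off the ring's four sides) with no direction state at all.
import Mathlib
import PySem

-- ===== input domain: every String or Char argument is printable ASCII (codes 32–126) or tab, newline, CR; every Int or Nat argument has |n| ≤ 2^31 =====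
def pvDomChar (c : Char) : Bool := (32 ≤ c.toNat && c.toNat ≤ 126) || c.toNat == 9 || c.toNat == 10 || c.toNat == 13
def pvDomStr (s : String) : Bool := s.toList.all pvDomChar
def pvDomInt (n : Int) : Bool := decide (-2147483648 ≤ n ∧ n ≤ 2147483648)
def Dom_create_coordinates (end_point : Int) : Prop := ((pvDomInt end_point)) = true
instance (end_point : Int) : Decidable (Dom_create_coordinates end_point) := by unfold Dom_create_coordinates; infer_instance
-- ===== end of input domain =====

-- B replaces A's per-step direction-string state machine by a closed-form
-- ring/offset formula for each number's coordinate (alternative algorithm, same cost).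

-- ===== PORT A =====
-- A's while loop, step for step: state (i, x, y, direction_to_move, amount_to_move, amount_moved)
def aLoop (e i x y : Int) (dir : String) (atm am : Int)
    (c : PySem.Dict Int (List Int)) : PySem.Dict Int (List Int) :=
  if h : i ≤ e then
    if dir = "right" then
      if atm = am + 1 then aLoop e (i+1) (x+1) y "up" atm 0 (c.insert i [x+1, y])
      else aLoop e (i+1) (x+1) y "right" atm (am+1) (c.insert i [x+1, y])
    else if dir = "up" then
      if atm = am + 1 then aLoop e (i+1) x (y+1) "left" (atm+1) 0 (c.insert i [x, y+1])
      else aLoop e (i+1) x (y+1) "up" atm (am+1) (c.insert i [x, y+1])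
    else if dir = "left" then
      if atm = am + 1 then aLoop e (i+1) (x-1) y "down" atm 0 (c.insert i [x-1, y])
      else aLoop e (i+1) (x-1) y "left" atm (am+1) (c.insert i [x-1, y])
    else if dir = "down" then
      if atm = am + 1 then aLoop e (i+1) x (y-1) "right" (atm+1) 0 (c.insert i [x, y-1])
      else aLoop e (i+1) x (y-1) "down" atm (am+1) (c.insert i [x, y-1])
    else aLoop e (i+1) x y dir atm am (c.insert i [x, y])
  else c
termination_by (e + 1 - i).toNat
decreasing_by all_goals omega

def create_coordinates (end_point : Int) : List (Int × List Int) :=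
  let coordinates : PySem.Dict Int (List Int) := PySem.Dict.empty
  let coordinates := coordinates.insert 1 [0, 0]
  (aLoop end_point 2 0 0 "right" 1 0 coordinates).items

-- ===== PORT B =====
-- Source B's helper _side_coord: coordinate of offset m along ring k
def bCoord (k m : Int) : List Int :=
  if m < 2*k then [k, m - k + 1]
  else if m < 4*k then [3*k - 1 - m, k]
  else if m < 6*k then [-k, 5*k - 1 - m]
  else [m - 7*k + 1, -k]

-- Source B's while loop: state (n, k)
def bLoop (e n k : Int) (c : PySem.Dict Int (List Int)) : PySem.Dict Int (List Int) :=
  if h : n ≤ e then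
    let k2 := if (2*k+1)^2 < n then k + 1 else k
    bLoop e (n+1) k2 (c.insert n (bCoord k2 (n - (2*k2-1)^2 - 1)))
  else c
termination_by (e + 1 - n).toNat
decreasing_by omega

def create_coordinates_alt (end_point : Int) : List (Int × List Int) :=
  let coordinates : PySem.Dict Int (List Int) := PySem.Dict.empty
  let coordinates := coordinates.insert 1 [0, 0]
  (bLoop end_point 2 1 coordinates).items

-- ===== PRECONDITION & SPEC =====
def Spec_create_coordinates (end_point : Int) (out : List (Int × List Int)) : Prop := out = create_coordinates_alt end_point
instance (end_point : Int) (out : List (Int × List Int)) : Decidable (Spec_create_coordinates end_point out) := by unfold Spec_create_coordinates; infer_instance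

-- ===== CLAIM =====
def Claim_equal_create_coordinates : Prop := ∀ (end_point : Int), Dom_create_coordinates end_point → Spec_create_coordinates end_point (create_coordinates end_point)

-- ===== LEMMAS AND PROOFS =====

-- invariant linking A's walk state before emitting index n to n's ring k and
-- offset M = n - 1 - q, where q = (2k-1)^2 (q is carried to keep arithmetic linear)
def StateOK (n k q x y : Int) (dir : String) (atm am : Int) : Prop :=
  (n - 1 - q = 0 ∧ dir = "right" ∧ atm = 2*k-1 ∧ am = 2*k-2 ∧ x = k-1 ∧ y = 1-k) ∨
  (1 ≤ n - 1 - q ∧ n - 1 - q ≤ 2*k-1 ∧ dir = "up" ∧ atm = 2*k-1 ∧ am = n-1-q-1 ∧ x = k ∧ y = n-1-q-k) ∨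
  (2*k ≤ n - 1 - q ∧ n - 1 - q ≤ 4*k-1 ∧ dir = "left" ∧ atm = 2*k ∧ am = n-1-q-2*k ∧ x = 3*k-(n-1-q) ∧ y = k) ∨
  (4*k ≤ n - 1 - q ∧ n - 1 - q ≤ 6*k-1 ∧ dir = "down" ∧ atm = 2*k ∧ am = n-1-q-4*k ∧ x = -k ∧ y = 5*k-(n-1-q)) ∨
  (6*k ≤ n - 1 - q ∧ n - 1 - q ≤ 8*k ∧ dir = "right" ∧ atm = 2*k+1 ∧ am = n-1-q-6*k ∧ x = n-1-q-7*k ∧ y = -k)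

theorem loop_agree (e : Int) : ∀ (fuel : Nat) (n k q x y : Int) (dir : String) (atm am : Int)
    (c : PySem.Dict Int (List Int)),
    (e + 1 - n).toNat ≤ fuel → 1 ≤ k → q = (2*k-1)^2 →
    StateOK n k q x y dir atm am →
    aLoop e n x y dir atm am c = bLoop e n k c := by
  intro fuel
  induction fuel with
  | zero =>
      intro n k q x y dir atm am c hf _ _ _
      rw [aLoop, dif_neg (by omega), bLoop, dif_neg (by omega)]
  | succ f ih =>
      intro n k q x y dir atm am c hf hk hq hs
      by_cases hne : n ≤ e
      case neg => rw [aLoop, dif_neg hne, bLoop, dif_neg hne]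
      have hq8 : (2*k+1)^2 = q + 8*k := by subst hq; ring
      have hq8' : (2*(k+1)-1)^2 = q + 8*k := by subst hq; ring
      rw [bLoop, dif_pos hne]
      rcases hs with ⟨hM, hd, hatm, ham, hx, hy⟩ | ⟨hM0, hM1, hd, hatm, ham, hx, hy⟩ |
        ⟨hM0, hM1, hd, hatm, ham, hx, hy⟩ | ⟨hM0, hM1, hd, hatm, ham, hx, hy⟩ |
        ⟨hM0, hM1, hd, hatm, ham, hx, hy⟩ <;> subst hd <;> rw [hatm, ham, hx, hy]
      -- case A: M = 0, dir "right", run completes, next is case B (ring k)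
      · rw [aLoop, dif_pos hne, if_pos rfl, if_pos (show 2*k-1 = 2*k-2 + 1 from by omega)]
        simp only [show ¬ ((2*k+1)^2 < n) from by omega, if_false]
        rw [show bCoord k (n - (2*k-1)^2 - 1) = [k-1+1, 1-k] from by
          rw [← hq]; unfold bCoord; rw [if_pos (show n - q - 1 < 2*k from by omega)]
          simp only [List.cons.injEq, and_true]; omega]
        exact ih (n+1) k q (k-1+1) (1-k) "up" (2*k-1) 0 _ (by omega) hk hq
          (Or.inr (Or.inl ⟨by omega, by omega, rfl, by omega, by omega, by omega, by omega⟩))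
      -- case B: dir "up"
      · rw [aLoop, dif_pos hne]
        simp only [show ¬ (("up" : String) = "right") from by decide, if_false]
        simp only [show ¬ ((2*k+1)^2 < n) from by omega, if_false]
        rw [show bCoord k (n - (2*k-1)^2 - 1) = [k, (n-1-q-k)+1] from by
          rw [← hq]; unfold bCoord; rw [if_pos (show n - q - 1 < 2*k from by omega)]
          simp only [List.cons.injEq, and_true, true_and]; omega]
        by_cases hend : n - 1 - q = 2*k-1
        · rw [if_pos (show 2*k-1 = n-1-q-1 + 1 from by omega)]
          exact ih (n+1) k q k ((n-1-q-k)+1) "left" (2*k-1+1) 0 _ (by omega) hk hq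
            (Or.inr (Or.inr (Or.inl ⟨by omega, by omega, rfl, by omega, by omega, by omega, by omega⟩)))
        · rw [if_neg (show ¬ (2*k-1 = n-1-q-1 + 1) from by omega)]
          exact ih (n+1) k q k ((n-1-q-k)+1) "up" (2*k-1) ((n-1-q-1)+1) _ (by omega) hk hq
            (Or.inr (Or.inl ⟨by omega, by omega, rfl, by omega, by omega, by omega, by omega⟩))
      -- case C: dir "left"
      · rw [aLoop, dif_pos hne]
        simp only [show ¬ (("left" : String) = "right") from by decide,
          show ¬ (("left" : String) = "up") from by decide, if_false]
        simp only [show ¬ ((2*k+1)^2 < n) from by omega, if_false]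
        rw [show bCoord k (n - (2*k-1)^2 - 1) = [3*k-(n-1-q) - 1, k] from by
          rw [← hq]; unfold bCoord
          rw [if_neg (show ¬ (n - q - 1 < 2*k) from by omega), if_pos (show n - q - 1 < 4*k from by omega)]
          simp only [List.cons.injEq, and_true]; omega]
        by_cases hend : n - 1 - q = 4*k-1
        · rw [if_pos (show 2*k = n-1-q-2*k + 1 from by omega)]
          exact ih (n+1) k q (3*k-(n-1-q)-1) k "down" (2*k) 0 _ (by omega) hk hq
            (Or.inr (Or.inr (Or.inr (Or.inl ⟨by omega, by omega, rfl, by omega, by omega, by omega, by omega⟩))))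
        · rw [if_neg (show ¬ (2*k = n-1-q-2*k + 1) from by omega)]
          exact ih (n+1) k q (3*k-(n-1-q)-1) k "left" (2*k) ((n-1-q-2*k)+1) _ (by omega) hk hq
            (Or.inr (Or.inr (Or.inl ⟨by omega, by omega, rfl, by omega, by omega, by omega, by omega⟩)))
      -- case D: dir "down"
      · rw [aLoop, dif_pos hne]
        simp only [show ¬ (("down" : String) = "right") from by decide,
          show ¬ (("down" : String) = "up") from by decide,
          show ¬ (("down" : String) = "left") from by decide, if_false]
        simp only [show ¬ ((2*k+1)^2 < n) from by omega, if_false]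
        rw [show bCoord k (n - (2*k-1)^2 - 1) = [-k, 5*k-(n-1-q) - 1] from by
          rw [← hq]; unfold bCoord
          rw [if_neg (show ¬ (n - q - 1 < 2*k) from by omega), if_neg (show ¬ (n - q - 1 < 4*k) from by omega), if_pos (show n - q - 1 < 6*k from by omega)]
          simp only [List.cons.injEq, and_true, true_and]; omega]
        by_cases hend : n - 1 - q = 6*k-1
        · rw [if_pos (show 2*k = n-1-q-4*k + 1 from by omega)]
          exact ih (n+1) k q (-k) (5*k-(n-1-q)-1) "right" (2*k+1) 0 _ (by omega) hk hq
            (Or.inr (Or.inr (Or.inr (Or.inr ⟨by omega, by omega, rfl, by omega, by omega, by omega, by omega⟩))))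
        · rw [if_neg (show ¬ (2*k = n-1-q-4*k + 1) from by omega)]
          exact ih (n+1) k q (-k) (5*k-(n-1-q)-1) "down" (2*k) ((n-1-q-4*k)+1) _ (by omega) hk hq
            (Or.inr (Or.inr (Or.inr (Or.inl ⟨by omega, by omega, rfl, by omega, by omega, by omega, by omega⟩))))
      -- case E: dir "right", 6k ≤ M ≤ 8k; at M = 8k the ring bumps
      · rw [aLoop, dif_pos hne, if_pos rfl]
        by_cases hbump : n - 1 - q = 8*k
        · -- M = 8k: the run of length 2k+1 completes; B enters ring k+1
          rw [if_pos (show 2*k+1 = n-1-q-6*k + 1 from by omega)]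
          simp only [show (2*k+1)^2 < n from by omega, if_true]
          rw [show bCoord (k+1) (n - (2*(k+1)-1)^2 - 1) = [n-1-q-7*k + 1, -k] from by
            rw [hq8']; unfold bCoord; rw [if_pos (show n - (q + 8*k) - 1 < 2*(k+1) from by omega)]
            simp only [List.cons.injEq, and_true]; omega]
          exact ih (n+1) (k+1) (q+8*k) (n-1-q-7*k+1) (-k) "up" (2*k+1) 0 _ (by omega)
            (by omega) (by omega)
            (Or.inr (Or.inl ⟨by omega, by omega, rfl, by omega, by omega, by omega, by omega⟩))
        · rw [if_neg (show ¬ (2*k+1 = n-1-q-6*k + 1) from by omega)]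
          simp only [show ¬ ((2*k+1)^2 < n) from by omega, if_false]
          rw [show bCoord k (n - (2*k-1)^2 - 1) = [n-1-q-7*k + 1, -k] from by
            rw [← hq]; unfold bCoord
            rw [if_neg (show ¬ (n - q - 1 < 2*k) from by omega), if_neg (show ¬ (n - q - 1 < 4*k) from by omega), if_neg (show ¬ (n - q - 1 < 6*k) from by omega)]
            simp only [List.cons.injEq, and_true]; omega]
          exact ih (n+1) k q (n-1-q-7*k+1) (-k) "right" (2*k+1) ((n-1-q-6*k)+1) _ (by omega) hk hq
            (Or.inr (Or.inr (Or.inr (Or.inr ⟨by omega, by omega, rfl, by omega, by omega, by omega, by omega⟩))))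

-- ===== VERDICT =====
theorem create_coordinates_spec : Claim_equal_create_coordinates := by
  intro e _
  unfold Spec_create_coordinates create_coordinates create_coordinates_alt
  dsimp only
  rw [loop_agree e (e + 1 - 2).toNat 2 1 1 0 0 "right" 1 0 _ (by omega) (by omega) (by norm_num)
    (Or.inl ⟨by norm_num, rfl, by norm_num, by norm_num, by norm_num, by norm_num⟩)]
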